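-- pv_equiv track=rewrite | github.com/FitchOpenSource/C4D-To-Unity | Cinema 4D/Clean.py | findNameMaterial
-- ===== SOURCE A (Python) =====
-- def findNameMaterial(string, materials, cnt):
--
--     cnt = cnt + 1
--     string  = string + "_" + str(cnt)
--     if materials.count(string) == 0:
--         return string
--     else:
--         string = findNameMaterial(string,materials,cnt)
--     return string
-- ===== SOURCE B (Python) =====
-- def findNameMaterial(string, materials, cnt):
--     existing = set(materials)
--     cnt = cnt + 1
--     string = string + "_" + str(cnt)
--     while string in existing:
--         cnt = cnt + 1
--         string = string + "_" + str(cnt)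
--     return string
-- ===== Notes on version B (the rewrite author's own statement) =====
-- stated objective: idiomatic
-- what changed: Replaces the tail recursion that rescans the list with materials.count on every step by a set built once and an iterative while loop testing membership.
import Mathlib
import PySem

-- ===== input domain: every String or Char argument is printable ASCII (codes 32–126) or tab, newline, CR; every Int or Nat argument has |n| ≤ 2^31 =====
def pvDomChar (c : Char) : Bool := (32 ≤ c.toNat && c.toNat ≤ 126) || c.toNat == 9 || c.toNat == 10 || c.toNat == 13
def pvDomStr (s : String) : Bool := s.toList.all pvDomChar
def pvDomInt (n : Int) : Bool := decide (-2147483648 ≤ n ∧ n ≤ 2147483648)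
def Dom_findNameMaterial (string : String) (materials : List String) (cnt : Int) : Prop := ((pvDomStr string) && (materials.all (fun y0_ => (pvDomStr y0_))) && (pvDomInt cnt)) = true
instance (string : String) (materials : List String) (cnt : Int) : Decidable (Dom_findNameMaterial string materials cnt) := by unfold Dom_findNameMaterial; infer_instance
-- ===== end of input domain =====

-- B replaces A's tail recursion (which rescans materials with .count each step) by a set built
-- once and an iterative while loop testing membership; same return value everywhere.


-- ===== PORT A =====
-- A's recursion, step for step: bump cnt, append "_"+str(cnt), return if count is 0, else recurse.
-- Fuel is only a totality guard: each recursive step's string is a fresh, strictly longer member of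
-- materials, so at most materials.length recursive calls happen; fuel materials.length + 1 is never
-- exhausted on any input.
def findNameMaterialFuel : Nat → String → List String → Int → String
  | 0, string, _, _ => string
  | fuel + 1, string, materials, cnt =>
    let cnt' := cnt + 1
    let string' := string ++ "_" ++ PySem.Int.toStr cnt'
    if PySem.List.count materials string' = 0 then
      string'
    else
      findNameMaterialFuel fuel string' materials cnt'

def findNameMaterial (string : String) (materials : List String) (cnt : Int) : String :=
  findNameMaterialFuel (materials.length + 1) string materials cnt

-- ===== PORT B =====
-- B's while loop: state is (string, cnt); the loop test is membership in the set built once.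
-- Same fuel bound as A's guard (after the initial append, at most materials.length further appends).
def findNameMaterialLoop : Nat → PySem.Set String → String → Int → String
  | 0, _, string, _ => string
  | fuel + 1, existing, string, cnt =>
    if PySem.Set.contains existing string then
      let cnt' := cnt + 1
      findNameMaterialLoop fuel existing (string ++ "_" ++ PySem.Int.toStr cnt') cnt'
    else
      string

def findNameMaterial_alt (string : String) (materials : List String) (cnt : Int) : String :=
  let existing := PySem.Set.ofList materials
  let cnt1 := cnt + 1
  let string1 := string ++ "_" ++ PySem.Int.toStr cnt1
  findNameMaterialLoop materials.length existing string1 cnt1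

-- ===== PRECONDITION & SPEC =====
def Spec_findNameMaterial (string : String) (materials : List String) (cnt : Int) (out : String) : Prop := out = findNameMaterial_alt string materials cnt
instance (string : String) (materials : List String) (cnt : Int) (out : String) : Decidable (Spec_findNameMaterial string materials cnt out) := by unfold Spec_findNameMaterial; infer_instance

-- ===== CLAIM (what is proved, stated in full; the proofs are below) =====
def Claim_equal_findNameMaterial : Prop := ∀ (string : String) (materials : List String) (cnt : Int), Dom_findNameMaterial string materials cnt → Spec_findNameMaterial string materials cnt (findNameMaterial string materials cnt)

-- ===== LEMMAS AND PROOFS =====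

-- count = 0 iff the element is not in the set of the list
theorem count_zero_iff_not_contains (materials : List String) (s : String) :
    PySem.List.count materials s = 0 ↔ PySem.Set.contains (PySem.Set.ofList materials) s = false := by
  simp [PySem.List.count_eq, PySem.Set.contains, PySem.Set.mem_ofList, List.count_eq_zero]

-- one-step unfolding lemmas (rw once, so nested successors are not unfolded)
theorem fuelA_succ (fuel : Nat) (string : String) (materials : List String) (cnt : Int) :
    findNameMaterialFuel (fuel + 1) string materials cnt =
      if PySem.List.count materials (string ++ "_" ++ PySem.Int.toStr (cnt + 1)) = 0 then
        string ++ "_" ++ PySem.Int.toStr (cnt + 1)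
      else findNameMaterialFuel fuel (string ++ "_" ++ PySem.Int.toStr (cnt + 1)) materials (cnt + 1) := rfl

theorem loopB_succ (fuel : Nat) (existing : PySem.Set String) (string : String) (cnt : Int) :
    findNameMaterialLoop (fuel + 1) existing string cnt =
      if PySem.Set.contains existing string then
        findNameMaterialLoop fuel existing (string ++ "_" ++ PySem.Int.toStr (cnt + 1)) (cnt + 1)
      else string := rfl

-- the recursion with one unit of extra fuel equals the loop run after the first append
theorem fuel_eq_loop (materials : List String) (fuel : Nat) :
    ∀ (string : String) (cnt : Int),
      findNameMaterialFuel (fuel + 1) string materials cnt =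
        findNameMaterialLoop fuel (PySem.Set.ofList materials)
          (string ++ "_" ++ PySem.Int.toStr (cnt + 1)) (cnt + 1) := by
  induction fuel with
  | zero =>
    intro string cnt
    rw [fuelA_succ]
    simp only [findNameMaterialFuel, findNameMaterialLoop]
    split <;> rfl
  | succ f ih =>
    intro string cnt
    rw [fuelA_succ, loopB_succ]
    by_cases h : PySem.List.count materials (string ++ "_" ++ PySem.Int.toStr (cnt + 1)) = 0
    · have hc := (count_zero_iff_not_contains ..).mp h
      rw [if_pos h, if_neg (by rw [hc]; exact Bool.false_ne_true)]
    · have hc : PySem.Set.contains (PySem.Set.ofList materials)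
          (string ++ "_" ++ PySem.Int.toStr (cnt + 1)) = true := by
        cases hcc : PySem.Set.contains (PySem.Set.ofList materials)
            (string ++ "_" ++ PySem.Int.toStr (cnt + 1))
        · exact absurd ((count_zero_iff_not_contains ..).mpr hcc) h
        · rfl
      rw [if_neg h, if_pos hc]
      exact ih (string ++ "_" ++ PySem.Int.toStr (cnt + 1)) (cnt + 1)

-- ===== VERDICT (by name: the statement is the Claim_ definition above) =====
theorem findNameMaterial_spec : Claim_equal_findNameMaterial := by
  intro string materials cnt _
  unfold Spec_findNameMaterial findNameMaterial findNameMaterial_alt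
  exact fuel_eq_loop materials materials.length string cnt
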